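-- pv_equiv track=rewrite | github.com/cfpisaca/IntroToEng | tests/midterm.py | multiples_of5_first
-- ===== SOURCE A (Python) =====
-- def multiples_of5_first(plist: list):
--     llist = []
--     for i in plist:
--         if i % 5 != 0:
--             llist.append(i)
--     elist = []
--     for i in plist:
--         if i % 5 == 0:
--             elist.append(i)
--     return elist + llist
-- ===== SOURCE B (Python) =====
-- def multiples_of5_first(plist: list):
--     # Stable sort: multiples of 5 (key False = 0) first, others (key True = 1)
--     # after, each group keeping its original order.
--     return sorted(plist, key=lambda x: x % 5 != 0)
-- ===== Notes on version B (the rewrite author's own statement) =====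
-- stated objective: idiomatic
-- what changed: Replaced the two filtering passes and list concatenation with a single key-based stable sort (sorted with key x % 5 != 0), relying on sort stability to keep each group in original order.
import Mathlib
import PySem

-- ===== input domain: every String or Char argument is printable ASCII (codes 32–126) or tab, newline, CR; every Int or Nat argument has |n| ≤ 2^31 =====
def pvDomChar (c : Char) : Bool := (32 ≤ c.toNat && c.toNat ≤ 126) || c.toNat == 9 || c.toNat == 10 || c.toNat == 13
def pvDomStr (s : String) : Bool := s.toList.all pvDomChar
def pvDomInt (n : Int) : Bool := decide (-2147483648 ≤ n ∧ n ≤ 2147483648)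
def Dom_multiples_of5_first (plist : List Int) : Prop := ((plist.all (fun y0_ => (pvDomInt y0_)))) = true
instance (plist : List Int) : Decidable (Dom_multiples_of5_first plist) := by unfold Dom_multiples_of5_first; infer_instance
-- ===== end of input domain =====

-- B replaces A's two filtering passes + concatenation with one key-based stable sort (idiomatic; same results).


-- ===== PORT A =====
def multiples_of5_first (plist : List Int) : List Int :=
  let llist := plist.foldl (fun acc i => if PySem.Int.mod i 5 ≠ 0 then acc ++ [i] else acc) []
  let elist := plist.foldl (fun acc i => if PySem.Int.mod i 5 = 0 then acc ++ [i] else acc) []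
  elist ++ llist

-- ===== PORT B =====
-- Python's bool sort key (False < True) is ported as the Int key 0/1.
def pvKey5 (x : Int) : Int := if PySem.Int.mod x 5 ≠ 0 then 1 else 0

def multiples_of5_first_alt (plist : List Int) : List Int :=
  PySem.List.sorted plist pvKey5 false

-- ===== PRECONDITION & SPEC =====
def Spec_multiples_of5_first (plist : List Int) (out : List Int) : Prop := out = multiples_of5_first_alt plist
instance (plist : List Int) (out : List Int) : Decidable (Spec_multiples_of5_first plist out) := by unfold Spec_multiples_of5_first; infer_instance

-- ===== CLAIM (what is proved, stated in full; the proofs are below) =====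
def Claim_equal_multiples_of5_first : Prop := ∀ (plist : List Int), Dom_multiples_of5_first plist → Spec_multiples_of5_first plist (multiples_of5_first plist)

-- ===== LEMMAS AND PROOFS =====

-- the insertion comparator used by PySem.List.sorted with key pvKey5
def pvBef (a b : Int) : Bool := decide (pvKey5 a < pvKey5 b)

lemma pvKey5_cases (x : Int) : pvKey5 x = 0 ∨ pvKey5 x = 1 := by
  unfold pvKey5; split_ifs <;> simp

-- inserting a key-0 element into (key-0 block ++ key-1 block) lands at the end of the first block
lemma pv_insert0 (x : Int) (e l : List Int) (hx : pvKey5 x = 0)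
    (he : ∀ y ∈ e, pvKey5 y = 0) (hl : ∀ y ∈ l, pvKey5 y = 1) :
    PySem.List.insertBy pvBef x (e ++ l) = e ++ x :: l := by
  induction e with
  | nil =>
    simp only [List.nil_append]
    cases l with
    | nil => rfl
    | cons y ys =>
      have : pvBef x y = true := by
        simp [pvBef, hx, hl y (by simp)]
      simp [PySem.List.insertBy, this]
  | cons a e ih =>
    have ha : pvKey5 a = 0 := he a (by simp)
    have : pvBef x a = false := by simp [pvBef, hx, ha]
    simp only [List.cons_append, PySem.List.insertBy, this, Bool.false_eq_true, if_false]
    rw [ih (fun y hy => he y (by simp [hy]))]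

-- inserting a key-1 element goes to the very end
lemma pv_insert1 (x : Int) (acc : List Int) (hx : pvKey5 x = 1) :
    PySem.List.insertBy pvBef x acc = acc ++ [x] := by
  apply PySem.List.insertBy_of_forall_not_before
  intro y _
  rcases pvKey5_cases y with h | h <;> simp [pvBef, hx, h]

-- loop invariant for the insertion-sort foldl: the accumulator stays (key-0 block ++ key-1 block)
lemma pv_sort_part (xs : List Int) : ∀ (e l : List Int),
    (∀ y ∈ e, pvKey5 y = 0) → (∀ y ∈ l, pvKey5 y = 1) →
    xs.foldl (fun acc x => PySem.List.insertBy pvBef x acc) (e ++ l) =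
      (e ++ xs.filter (fun x => decide (PySem.Int.mod x 5 = 0))) ++
      (l ++ xs.filter (fun x => !decide (PySem.Int.mod x 5 = 0))) := by
  induction xs with
  | nil => intro e l _ _; simp
  | cons x xs ih =>
    intro e l he hl
    by_cases hx : PySem.Int.mod x 5 = 0
    · have hk : pvKey5 x = 0 := by
        simp only [pvKey5, ne_eq, hx, not_true_eq_false, if_false]
      have hd : decide (PySem.Int.mod x 5 = 0) = true := decide_eq_true hx
      have h1 : PySem.List.insertBy pvBef x (e ++ l) = (e ++ [x]) ++ l := by
        rw [pv_insert0 x e l hk he hl]; simp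
      have he' : ∀ y ∈ e ++ [x], pvKey5 y = 0 := by
        intro y hy
        rcases List.mem_append.1 hy with h | h
        · exact he y h
        · simp only [List.mem_singleton] at h; subst h; exact hk
      simp only [List.foldl_cons, h1]
      rw [ih (e ++ [x]) l he' hl]
      have hx5 : (5:Int) ∣ x := (PySem.Int.mod_eq_zero_iff_dvd x 5).1 hx
      simp [hx5]
    · have hk : pvKey5 x = 1 := by
        simp only [pvKey5, ne_eq, hx, not_false_eq_true, if_true]
      have hd : decide (PySem.Int.mod x 5 = 0) = false := decide_eq_false hx
      have h1 : PySem.List.insertBy pvBef x (e ++ l) = e ++ (l ++ [x]) := by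
        rw [pv_insert1 x (e ++ l) hk]; simp
      have hl' : ∀ y ∈ l ++ [x], pvKey5 y = 1 := by
        intro y hy
        rcases List.mem_append.1 hy with h | h
        · exact hl y h
        · simp only [List.mem_singleton] at h; subst h; exact hk
      simp only [List.foldl_cons, h1]
      rw [ih e (l ++ [x]) he hl']
      have hx5 : ¬ (5:Int) ∣ x := fun h => hx ((PySem.Int.mod_eq_zero_iff_dvd x 5).2 h)
      simp [hx5]

-- ===== VERDICT (by name: the statement is the Claim_ definition above) =====
theorem multiples_of5_first_spec : Claim_equal_multiples_of5_first := by
  intro plist _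
  unfold Spec_multiples_of5_first multiples_of5_first multiples_of5_first_alt
  rw [PySem.List.sorted_eq_foldl_insertBy]
  have hpart := pv_sort_part plist [] [] (by simp) (by simp)
  simp only [List.nil_append] at hpart
  have hA : (fun (acc : List Int) i => if PySem.Int.mod i 5 = 0 then acc ++ [i] else acc) =
      (fun acc i => if (decide (PySem.Int.mod i 5 = 0)) = true then acc ++ [id i] else acc) := by
    funext acc i; simp
  have hB : (fun (acc : List Int) i => if PySem.Int.mod i 5 ≠ 0 then acc ++ [i] else acc) =
      (fun acc i => if (!decide (PySem.Int.mod i 5 = 0)) = true then acc ++ [id i] else acc) := by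
    funext acc i; simp
  show List.foldl _ [] plist ++ List.foldl _ [] plist = _
  rw [hA, hB, PySem.List.foldl_append_if, PySem.List.foldl_append_if]
  simpa using hpart.symm
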